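-- pv_equiv track=rewrite | github.com/OrikasaKisaki/WM9A4-Digital-Development-with-Python | python/word_filter.py | word_filter_counter
-- ===== SOURCE A (Python) =====
-- import string
--
-- def word_filter_counter(text, filter_words):
--     # Your code goes here
--     # Implement the logic to filter words and count their occurrences
--
--  # Convert filter words to lowercase and convert to lowercase 转换为小写
--     filter_words = [word.lower() for word in filter_words]
--
-- # Remove punctuation from text    移除标点符号
--     #string.punctuation包含了所有标准的ASCII标点符号
--     #str.maketrans 用于创建字符映射转换表
--     #translate 方法用于执行实际的字符替换或删除操作
--     text = text.translate(str.maketrans('', '', string.punctuation))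
--  # Split the text into words  分割文本为单词
--     words = text.split()
-- # Count occurrences of each word in filter_words 计算单词出现次数
--     count_dict = {}
--     for word in filter_words:
--         count_dict[word] = words.count(word)
--
--     return count_dict
-- ===== SOURCE B (Python) =====
-- import string
--
-- def word_filter_counter(text, filter_words):
--     # Seed the result with every lowercased filter word -> 0 (in order),
--     # then make ONE pass over the text tokens, incrementing matches.
--     lowered = [w.lower() for w in filter_words]
--     count_dict = {}
--     for w in lowered:
--         count_dict[w] = 0
--     filter_set = set(lowered)
--     words = text.translate(str.maketrans('', '', string.punctuation)).split()
--     for token in words: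
--         if token in filter_set:
--             count_dict[token] += 1
--     return count_dict
-- ===== Notes on version B (the rewrite author's own statement) =====
-- stated objective: alternative
-- what changed: A scans the whole token list once per filter word (words.count inside a loop over the filter words); B seeds the dict with zeros and makes a single pass over the text tokens, incrementing via a set membership test, so the per-filter-word inner scan disappears.
import Mathlib
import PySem

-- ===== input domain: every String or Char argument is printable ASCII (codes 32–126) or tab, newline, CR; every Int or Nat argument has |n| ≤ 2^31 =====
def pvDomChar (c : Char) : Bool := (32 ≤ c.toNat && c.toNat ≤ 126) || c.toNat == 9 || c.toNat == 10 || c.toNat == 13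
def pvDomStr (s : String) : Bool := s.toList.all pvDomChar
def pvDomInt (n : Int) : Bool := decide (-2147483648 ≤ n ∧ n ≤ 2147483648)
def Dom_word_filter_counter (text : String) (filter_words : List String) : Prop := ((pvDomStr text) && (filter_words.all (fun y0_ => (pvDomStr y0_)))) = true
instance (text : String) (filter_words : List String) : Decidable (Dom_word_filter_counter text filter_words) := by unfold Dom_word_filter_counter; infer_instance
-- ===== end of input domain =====

-- B replaces A's per-filter-word scan of the token list (words.count in a loop) by a zero-seeded
-- dict and ONE pass over the tokens with a set membership test (objective: alternative).

-- ===== PORT A =====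
-- string.punctuation
def pvPunct : List Char := "!\"#$%&'()*+,-./:;<=>?@[\\]^_`{|}~".toList

-- text.translate(str.maketrans('', '', string.punctuation)): a deletion-only table, exactly
-- removes the characters of string.punctuation; ported by hand as a character filter (exact).
def pvStripPunct (text : String) : String :=
  String.ofList (text.toList.filter (fun c => !(pvPunct.contains c)))

def word_filter_counter (text : String) (filter_words : List String) : List (String × Int) :=
  let fws := filter_words.map PySem.Str.lower
  let words := PySem.Str.split₀ (pvStripPunct text)
  (fws.foldl (fun d w => d.insert w ((PySem.List.count words w : Nat) : Int)) PySem.Dict.empty).items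

-- ===== PORT B =====
def word_filter_counter_alt (text : String) (filter_words : List String) : List (String × Int) :=
  let lowered := filter_words.map PySem.Str.lower
  let seeded := lowered.foldl (fun d w => d.insert w (0 : Int)) PySem.Dict.empty
  let fset : PySem.Set String := PySem.Set.ofList lowered
  let words := PySem.Str.split₀ (pvStripPunct text)
  (words.foldl (fun d t => if PySem.Set.contains fset t then d.modify t 0 (· + 1) else d) seeded).items

-- ===== PRECONDITION & SPEC =====
def Spec_word_filter_counter (text : String) (filter_words : List String) (out : List (String × Int)) : Prop := out = word_filter_counter_alt text filter_words
instance (text : String) (filter_words : List String) (out : List (String × Int)) : Decidable (Spec_word_filter_counter text filter_words out) := by unfold Spec_word_filter_counter; infer_instance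

-- ===== CLAIM (what is proved, stated in full; the proofs are below) =====
def Claim_equal_word_filter_counter : Prop := ∀ (text : String) (filter_words : List String), Dom_word_filter_counter text filter_words → Spec_word_filter_counter text filter_words (word_filter_counter text filter_words)

-- ===== LEMMAS AND PROOFS =====

-- A loop 'for w in l: d[w] = g(w)' starting from {} yields the first-occurrence-deduped keys,
-- each mapped through g (duplicates overwrite with the same value).
theorem foldl_insert_fun_items (l : List String) (g : String → Int) :
    (l.foldl (fun d w => d.insert w (g w)) PySem.Dict.empty).items
      = (PySem.Set.ofList l).map (fun k => (k, g k)) := by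
  induction l using List.reverseRecOn with
  | nil => rfl
  | append_singleton l w ih =>
    rw [List.foldl_append, PySem.Set.ofList_append_singleton]
    simp only [List.foldl_cons, List.foldl_nil]
    have hkeys : (l.foldl (fun d w => d.insert w (g w)) PySem.Dict.empty).keys
        = PySem.Set.ofList l := by
      rw [PySem.Dict.keys_foldl_insert l (fun _ w => g w), PySem.Dict.keys_empty,
        PySem.Set.update_nil_left]
    by_cases hw : w ∈ l
    · have hc : (l.foldl (fun d w => d.insert w (g w)) PySem.Dict.empty).contains w = true := by
        rw [PySem.Dict.contains_iff_mem_keys, hkeys, PySem.Set.mem_ofList]; exact hw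
      rw [PySem.Dict.items_insert_of_contains _ _ hc, ih,
        PySem.Set.add_of_mem (by rw [PySem.Set.mem_ofList]; exact hw)]
      rw [List.map_map]
      refine List.map_congr_left ?_
      intro k _
      by_cases hkw : k = w
      · subst hkw; simp
      · simp [hkw]
    · have hc : (l.foldl (fun d w => d.insert w (g w)) PySem.Dict.empty).contains w = false := by
        rw [Bool.eq_false_iff, Ne, PySem.Dict.contains_iff_mem_keys, hkeys, PySem.Set.mem_ofList]
        exact hw
      rw [PySem.Dict.items_insert_of_not_contains _ _ hc, ih,
        PySem.Set.add_of_not_mem (by rw [PySem.Set.mem_ofList]; exact hw)]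
      simp

-- B's single pass: keys are preserved and every key gains exactly its count among the
-- tokens that pass the filter-set test (keys outside the set are untouched).
theorem bloop_spec (fset : PySem.Set String) (L : List String) (d : PySem.Dict String Int)
    (hsub : ∀ w ∈ fset, w ∈ d.keys) :
    (L.foldl (fun d t => if PySem.Set.contains fset t then d.modify t 0 (· + 1) else d) d).keys = d.keys ∧
    ∀ k, (L.foldl (fun d t => if PySem.Set.contains fset t then d.modify t 0 (· + 1) else d) d).getD k 0
        = d.getD k 0 + (if k ∈ fset then (List.count k L : Int) else 0) := by
  induction L generalizing d with
  | nil => exact ⟨rfl, fun k => by simp⟩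
  | cons t L ih =>
    simp only [List.foldl_cons]
    by_cases ht : PySem.Set.contains fset t = true
    · have htm : t ∈ fset := (PySem.Set.contains_iff fset t).mp ht
      have hck : d.contains t = true := (PySem.Dict.contains_iff_mem_keys d t).mpr (hsub t htm)
      have hkeys : (d.modify t 0 (· + 1)).keys = d.keys := by
        rw [PySem.Dict.keys_modify, PySem.Dict.keys_insert_of_contains _ _ hck]
      rw [if_pos ht]
      have ih' := ih (d.modify t 0 (· + 1)) (fun w hw => hkeys ▸ hsub w hw)
      refine ⟨ih'.1.trans hkeys, ?_⟩
      intro k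
      rw [ih'.2 k, PySem.Dict.getD_modify, List.count_cons]
      by_cases hk : k = t
      · subst hk
        simp only [if_pos htm, BEq.rfl, Nat.cast_add]
        push_cast
        ring
      · simp [hk, Ne.symm hk]
    · rw [if_neg ht]
      rw [Bool.not_eq_true] at ht
      have htn : t ∉ fset := fun hm => by
        rw [(PySem.Set.contains_iff fset t).mpr hm] at ht; cases ht
      have ih' := ih d hsub
      refine ⟨ih'.1, ?_⟩
      intro k
      rw [ih'.2 k, List.count_cons]
      by_cases hf : k ∈ fset
      · have hkt : k ≠ t := fun h => htn (h ▸ hf)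
        simp [hf, Ne.symm hkt]
      · simp [hf]

theorem word_filter_counter_eq (text : String) (filter_words : List String) :
    word_filter_counter text filter_words = word_filter_counter_alt text filter_words := by
  unfold word_filter_counter word_filter_counter_alt
  simp only []
  set lowered := filter_words.map PySem.Str.lower with hl
  set words := PySem.Str.split₀ (pvStripPunct text) with hwds
  set seeded := lowered.foldl (fun d w => d.insert w (0 : Int)) PySem.Dict.empty with hs
  have hseed : seeded.items = (PySem.Set.ofList lowered).map (fun k => (k, (0 : Int))) :=
    foldl_insert_fun_items lowered (fun _ => 0)
  have hkeys : seeded.keys = PySem.Set.ofList lowered := by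
    rw [hs, PySem.Dict.keys_foldl_insert lowered (fun _ _ => (0 : Int)), PySem.Dict.keys_empty,
      PySem.Set.update_nil_left]
  have hnd : seeded.keys.Nodup := hkeys ▸ PySem.Set.nodup_ofList lowered
  have hsub : ∀ w ∈ (PySem.Set.ofList lowered : PySem.Set String), w ∈ seeded.keys := by
    intro w hw; rw [hkeys]; exact hw
  have hb := bloop_spec (PySem.Set.ofList lowered) words seeded hsub
  have hzero : ∀ k ∈ (PySem.Set.ofList lowered : PySem.Set String), seeded.getD k 0 = 0 := by
    intro k hk
    have hm : (k, (0 : Int)) ∈ seeded.items := by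
      rw [hseed]; exact List.mem_map_of_mem hk
    exact PySem.Dict.getD_of_mem_items seeded hm hnd 0
  have hndr : (words.foldl
      (fun d t => if PySem.Set.contains (PySem.Set.ofList lowered) t then d.modify t 0 (· + 1) else d)
      seeded).keys.Nodup := by
    rw [hb.1]; exact hnd
  rw [foldl_insert_fun_items lowered (fun w => ((PySem.List.count words w : Nat) : Int)),
    PySem.Dict.items_eq_map_keys _ hndr 0, hb.1, hkeys]
  refine List.map_congr_left ?_
  intro k hk
  rw [hb.2 k, hzero k hk, if_pos hk, PySem.List.count_eq]
  simp

-- ===== VERDICT (by name: the statement is the Claim_ definition above) =====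
theorem word_filter_counter_spec : Claim_equal_word_filter_counter := by
  intro text filter_words _
  unfold Spec_word_filter_counter
  exact word_filter_counter_eq text filter_words
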